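-- pv_equiv track=rewrite | github.com/Zachanardo/Intellicrack | intellicrack/core/analysis/radare2_json_standardizer.py | _extract_string_pattern_features
-- ===== SOURCE A (Python) =====
-- from typing import Any
--
-- def _extract_string_pattern_features(raw_result: dict[str, Any]) -> dict[str, Any]:
--     """Extract string pattern features for ML."""
--     strings = raw_result.get("strings", [])
--     return {
--         "url_patterns": len([s for s in strings if "http" in s.get("value", "").lower()]),
--         "file_path_patterns": len([s for s in strings if "\\" in s.get("value", "") or "/" in s.get("value", "")]),
--         "registry_patterns": len([s for s in strings if "HKEY_" in s.get("value", "")]),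
--         "crypto_patterns": len(
--             [s for s in strings if any(crypto in s.get("value", "").lower() for crypto in ["aes", "rsa", "md5", "sha"])],
--         ),
--     }
-- ===== SOURCE B (Python) =====
-- from typing import Any
--
-- def _extract_string_pattern_features(raw_result: dict[str, Any]) -> dict[str, Any]:
--     """Extract string pattern features for ML (single pass, four counters)."""
--     url = file_path = registry = crypto = 0
--     for s in raw_result.get("strings", []):
--         value = s.get("value", "")
--         low = value.lower()
--         if "http" in low:
--             url += 1
--         if "\\" in value or "/" in value:
--             file_path += 1
--         if "HKEY_" in value:
--             registry += 1
--         if any(c in low for c in ["aes", "rsa", "md5", "sha"]):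
--             crypto += 1
--     return {
--         "url_patterns": url,
--         "file_path_patterns": file_path,
--         "registry_patterns": registry,
--         "crypto_patterns": crypto,
--     }
-- ===== Notes on version B (the rewrite author's own statement) =====
-- stated objective: simpler
-- what changed: Replaces four separate list-comprehension passes over the strings list (with .lower() recomputed per pass) with one loop maintaining four integer counters, computing value and its lowercase form once per element.
import Mathlib
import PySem

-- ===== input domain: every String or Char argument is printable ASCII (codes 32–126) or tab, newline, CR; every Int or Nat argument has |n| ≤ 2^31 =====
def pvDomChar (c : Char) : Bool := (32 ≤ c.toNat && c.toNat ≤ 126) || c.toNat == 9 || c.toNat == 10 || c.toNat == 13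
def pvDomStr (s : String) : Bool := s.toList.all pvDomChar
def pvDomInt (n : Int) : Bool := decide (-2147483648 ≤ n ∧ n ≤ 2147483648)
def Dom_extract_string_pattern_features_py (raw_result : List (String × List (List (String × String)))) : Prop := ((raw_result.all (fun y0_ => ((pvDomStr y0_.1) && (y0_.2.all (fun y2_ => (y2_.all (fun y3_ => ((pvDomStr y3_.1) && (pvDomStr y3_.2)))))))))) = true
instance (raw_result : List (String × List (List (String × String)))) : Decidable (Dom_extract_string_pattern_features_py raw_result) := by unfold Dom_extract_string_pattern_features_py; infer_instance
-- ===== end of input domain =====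

-- B replaces A's four separate filtering passes over the strings list with a single
-- fold maintaining four integer counters (objective: simpler, one pass).


-- ===== PORT A =====
-- one predicate per comprehension of A, applied in four separate passes as A does
def pvA_url (s : List (String × String)) : Bool :=
  PySem.Str.isIn "http" (PySem.Str.lower ((PySem.Dict.mk s).getD "value" ""))
def pvA_path (s : List (String × String)) : Bool :=
  PySem.Str.isIn "\\" ((PySem.Dict.mk s).getD "value" "") || PySem.Str.isIn "/" ((PySem.Dict.mk s).getD "value" "")
def pvA_reg (s : List (String × String)) : Bool :=
  PySem.Str.isIn "HKEY_" ((PySem.Dict.mk s).getD "value" "")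
def pvA_crypto (s : List (String × String)) : Bool :=
  ["aes", "rsa", "md5", "sha"].any (fun c => PySem.Str.isIn c (PySem.Str.lower ((PySem.Dict.mk s).getD "value" "")))

def extract_string_pattern_features_py (raw_result : List (String × List (List (String × String)))) : List (String × Int) :=
  let strings := (PySem.Dict.mk raw_result).getD "strings" []
  [("url_patterns", ((strings.filter pvA_url).length : Int)),
   ("file_path_patterns", ((strings.filter pvA_path).length : Int)),
   ("registry_patterns", ((strings.filter pvA_reg).length : Int)),
   ("crypto_patterns", ((strings.filter pvA_crypto).length : Int))]

-- ===== PORT B =====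
-- one pass: fold with four integer counters, value/low computed once per element
def pvB_step (acc : Int × Int × Int × Int) (s : List (String × String)) : Int × Int × Int × Int :=
  let value := (PySem.Dict.mk s).getD "value" ""
  let low := PySem.Str.lower value
  (acc.1 + (if PySem.Str.isIn "http" low then 1 else 0),
   acc.2.1 + (if PySem.Str.isIn "\\" value || PySem.Str.isIn "/" value then 1 else 0),
   acc.2.2.1 + (if PySem.Str.isIn "HKEY_" value then 1 else 0),
   acc.2.2.2 + (if ["aes", "rsa", "md5", "sha"].any (fun c => PySem.Str.isIn c low) then 1 else 0))

def extract_string_pattern_features_py_alt (raw_result : List (String × List (List (String × String)))) : List (String × Int) :=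
  let strings := (PySem.Dict.mk raw_result).getD "strings" []
  let r := strings.foldl pvB_step (0, 0, 0, 0)
  [("url_patterns", r.1), ("file_path_patterns", r.2.1),
   ("registry_patterns", r.2.2.1), ("crypto_patterns", r.2.2.2)]

-- ===== PRECONDITION & SPEC =====
def Spec_extract_string_pattern_features_py (raw_result : List (String × List (List (String × String)))) (out : List (String × Int)) : Prop := out = extract_string_pattern_features_py_alt raw_result
instance (raw_result : List (String × List (List (String × String)))) (out : List (String × Int)) : Decidable (Spec_extract_string_pattern_features_py raw_result out) := by unfold Spec_extract_string_pattern_features_py; infer_instance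

-- ===== CLAIM (what is proved, stated in full; the proofs are below) =====
def Claim_equal_extract_string_pattern_features_py : Prop := ∀ (raw_result : List (String × List (List (String × String)))), Dom_extract_string_pattern_features_py raw_result → Spec_extract_string_pattern_features_py raw_result (extract_string_pattern_features_py raw_result)

-- ===== LEMMAS AND PROOFS =====
-- the fold's four counters are the four filter-lengths, each shifted by its start value
theorem pvB_fold_counts (l : List (List (String × String))) (a b c d : Int) :
    l.foldl pvB_step (a, b, c, d) =
      (a + ((l.filter pvA_url).length : Int),
       b + ((l.filter pvA_path).length : Int),
       c + ((l.filter pvA_reg).length : Int),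
       d + ((l.filter pvA_crypto).length : Int)) := by
  induction l generalizing a b c d with
  | nil => simp
  | cons x t ih =>
    simp only [List.foldl_cons, List.filter_cons]
    rw [pvB_step, ih]
    unfold pvA_url pvA_path pvA_reg pvA_crypto
    split_ifs <;> simp <;> omega

-- ===== VERDICT (by name: the statement is the Claim_ definition above) =====
theorem extract_string_pattern_features_py_spec : Claim_equal_extract_string_pattern_features_py := by
  intro raw_result _
  unfold Spec_extract_string_pattern_features_py extract_string_pattern_features_py
    extract_string_pattern_features_py_alt
  simp only [pvB_fold_counts]
  simp
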